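-- pv_equiv track=rewrite | github.com/ZubairHussainK/smis | core/security_manager.py | validate_key_format
-- ===== SOURCE A (Python) =====
-- def validate_key_format(key: str) -> bool:
--     """Validate key format - supports both SMIS and Enhanced formats."""
--     if not key:
--         return False
--
--     # Check for Enhanced format (25 chars: XXXXX-XXXXX-XXXXX-XXXXX-XXXXX)
--     if len(key) == 29:  # 25 chars + 4 dashes = 29
--         parts = key.split('-')
--         if len(parts) == 5:
--             # All parts should be 5 characters and alphanumeric
--             for part in parts:
--                 if len(part) != 5 or not part.isalnum():
--                     return False
--             return True
--
--     # Check for SMIS format (24 chars: SMIS-XXXX-XXXX-XXXX-XXXX)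
--     if len(key) == 24:
--         parts = key.split('-')
--         if len(parts) != 5 or parts[0] != 'SMIS':
--             return False
--
--         # Validate each part
--         if len(parts[1]) != 4 or not parts[1].isalnum():
--             return False
--         if len(parts[2]) != 4 or not parts[2].isdigit():
--             return False
--         if len(parts[3]) != 4 or not parts[3].isalnum():
--             return False
--         if len(parts[4]) != 4 or not parts[4].isalnum():
--             return False
--
--         return True
--
--     return False
-- ===== SOURCE B (Python) =====
-- def validate_key_format(key: str) -> bool:
--     """Validate by matching the key against a positional pattern mask (no splitting):
--     '*' = alphanumeric char, '#' = digit char, anything else must match literally."""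
--     if len(key) == 29:
--         pattern = "*****-*****-*****-*****-*****"
--     elif len(key) == 24:
--         pattern = "SMIS-****-####-****-****"
--     else:
--         return False
--     for ch, p in zip(key, pattern):
--         if p == '*':
--             if not ch.isalnum():
--                 return False
--         elif p == '#':
--             if not ch.isdigit():
--                 return False
--         elif ch != p:
--             return False
--     return True
-- ===== Notes on version B (the rewrite author's own statement) =====
-- stated objective: alternative
-- what changed: Replaces split-on-dash plus per-part length/charset checks with direct pattern-mask matching: each of the two formats is a fixed mask string ('*'=alnum, '#'=digit, else literal) and the key is validated by one zip over key and mask, never splitting.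
import Mathlib
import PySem

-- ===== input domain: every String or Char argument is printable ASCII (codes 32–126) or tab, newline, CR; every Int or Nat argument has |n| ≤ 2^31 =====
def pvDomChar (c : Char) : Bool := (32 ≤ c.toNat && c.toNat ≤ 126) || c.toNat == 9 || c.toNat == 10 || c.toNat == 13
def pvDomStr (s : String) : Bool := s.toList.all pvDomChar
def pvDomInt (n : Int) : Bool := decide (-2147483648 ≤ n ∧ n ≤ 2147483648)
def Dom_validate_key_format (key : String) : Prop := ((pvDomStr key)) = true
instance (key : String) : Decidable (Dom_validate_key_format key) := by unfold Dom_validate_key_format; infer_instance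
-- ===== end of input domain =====

-- B replaces A's split-on-dash + per-part checks with positional pattern-mask matching (objective: alternative).

-- ===== PORT A =====
-- the Enhanced-format branch: some b = the branch returned b; none = it fell through
-- (split '-' : sep ≠ "", so split? is always some; .getD [] is unreachable)
def vkfEnhanced (key : String) : Option Bool :=
  if PySem.Str.len key = 29 then
    let parts := (PySem.Str.split? key "-").getD []
    if parts.length = 5 then
      -- the for-loop: every part must have length 5 and be alnum
      some (parts.all (fun part => PySem.Str.len part == 5 && PySem.Str.strIsalnum part))
    else none
  else none

-- the SMIS-format branch; parts[i] accessed only after len(parts) == 5 is known, so the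
-- .getD "" defaults are unreachable (pyGet? is some there)
def vkfSmis (key : String) : Option Bool :=
  if PySem.Str.len key = 24 then
    let parts := (PySem.Str.split? key "-").getD []
    if parts.length ≠ 5 then some false
    else if (PySem.List.pyGet? parts 0).getD "" ≠ "SMIS" then some false
    else
      let p1 := (PySem.List.pyGet? parts 1).getD ""
      let p2 := (PySem.List.pyGet? parts 2).getD ""
      let p3 := (PySem.List.pyGet? parts 3).getD ""
      let p4 := (PySem.List.pyGet? parts 4).getD ""
      if PySem.Str.len p1 ≠ 4 ∨ ¬ PySem.Str.strIsalnum p1 then some false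
      else if PySem.Str.len p2 ≠ 4 ∨ ¬ PySem.Str.strIsdigit p2 then some false
      else if PySem.Str.len p3 ≠ 4 ∨ ¬ PySem.Str.strIsalnum p3 then some false
      else if PySem.Str.len p4 ≠ 4 ∨ ¬ PySem.Str.strIsalnum p4 then some false
      else some true
  else none

def validate_key_format (key : String) : Bool :=
  if key == "" then false
  else
    match vkfEnhanced key with
    | some b => b
    | none =>
      match vkfSmis key with
      | some b => b
      | none => false

-- ===== PORT B =====
-- one mask char against one key char: '*' = alnum, '#' = digit, else literal
def vkfCheckChar (ch p : Char) : Bool :=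
  if p == '*' then PySem.Chars.isalnum ch
  else if p == '#' then PySem.Chars.isdigit ch
  else ch == p

-- the zip loop of Source B: every (key char, mask char) pair must check out
def vkfMatches (cs pat : List Char) : Bool :=
  (cs.zip pat).all (fun cp => vkfCheckChar cp.1 cp.2)

def validate_key_format_alt (key : String) : Bool :=
  if PySem.Str.len key = 29 then
    vkfMatches key.toList "*****-*****-*****-*****-*****".toList
  else if PySem.Str.len key = 24 then
    vkfMatches key.toList "SMIS-****-####-****-****".toList
  else false

-- ===== PRECONDITION & SPEC =====
def Spec_validate_key_format (key : String) (out : Bool) : Prop := out = validate_key_format_alt key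
instance (key : String) (out : Bool) : Decidable (Spec_validate_key_format key out) := by unfold Spec_validate_key_format; infer_instance

-- ===== CLAIM (what is proved, stated in full; the proofs are below) =====
def Claim_equal_validate_key_format : Prop := ∀ (key : String), Dom_validate_key_format key → Spec_validate_key_format key (validate_key_format key)

-- ===== LEMMAS AND PROOFS =====

-- structural model of PySem.Chars.splitOn on the single-char separator '-'
def spD : List Char → List Char → List (List Char)
  | [], cur => [cur.reverse]
  | c :: rest, cur => if c = '-' then cur.reverse :: spD rest [] else spD rest (c :: cur)

theorem spD_ne_nil (l cur : List Char) : spD l cur ≠ [] := by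
  induction l generalizing cur with
  | nil => simp [spD]
  | cons c rest ih => by_cases h : c = '-' <;> simp [spD, h, ih]

theorem splitOn_go_eq_spD : ∀ (fuel : Nat) (l cur : List Char) (acc : List (List Char)),
    l.length < fuel →
    PySem.Chars.splitOn.go ['-'] fuel l cur acc = acc.reverse ++ spD l cur := by
  intro fuel
  induction fuel with
  | zero => intro l cur acc h; omega
  | succ n ih =>
    intro l cur acc h
    match l with
    | [] => simp [PySem.Chars.splitOn.go, spD]
    | c :: rest =>
      by_cases hc : c = '-'
      · subst hc
        have : List.isPrefixOf ['-'] ('-' :: rest) = true := by simp [List.isPrefixOf]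
        simp only [PySem.Chars.splitOn.go, this, if_pos]
        rw [show List.drop (['-'] : List Char).length ('-' :: rest) = rest from rfl]
        rw [ih rest [] (cur.reverse :: acc) (by simpa using Nat.lt_of_succ_lt_succ h)]
        simp [spD]
      · have : List.isPrefixOf ['-'] (c :: rest) = false := by
          simp [List.isPrefixOf]; exact fun hh => (hc hh.symm)
        simp only [PySem.Chars.splitOn.go, this]
        rw [ih rest (c :: cur) acc (by simpa using Nat.lt_of_succ_lt_succ h)]
        simp [spD, hc]

theorem splitOn_eq_spD (cs : List Char) : PySem.Chars.splitOn cs ['-'] = spD cs [] := by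
  unfold PySem.Chars.splitOn
  rw [splitOn_go_eq_spD (cs.length + 1) cs [] [] (by omega)]
  simp

-- joining the pieces back with '-' recovers the input
def joinD : List (List Char) → List Char
  | [] => []
  | [p] => p
  | p :: q :: ps => p ++ '-' :: joinD (q :: ps)

theorem spD_join : ∀ (l cur : List Char), joinD (spD l cur) = cur.reverse ++ l := by
  intro l
  induction l with
  | nil => intro cur; simp [spD, joinD]
  | cons c rest ih =>
    intro cur
    by_cases hc : c = '-'
    · subst hc
      simp only [spD, if_pos]
      rcases hq : spD rest [] with _ | ⟨q, ps⟩
      · exact absurd hq (spD_ne_nil rest [])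
      · have := ih []
        rw [hq] at this
        simp [joinD, this]
    · simp only [spD, if_neg hc]
      rw [ih (c :: cur)]
      simp

theorem spD_no_dash (l : List Char) : ∀ cur, '-' ∉ l → spD l cur = [cur.reverse ++ l] := by
  induction l with
  | nil => intro cur _; simp [spD]
  | cons c rest ih =>
    intro cur h
    have hc : c ≠ '-' := fun hh => h (by simp [hh])
    have hr : '-' ∉ rest := fun hh => h (by simp [hh])
    simp [spD, hc, ih (c :: cur) hr]

theorem spD_append (a : List Char) : ∀ (b cur : List Char), '-' ∉ a →
    spD (a ++ '-' :: b) cur = (cur.reverse ++ a) :: spD b [] := by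
  induction a with
  | nil => intro b cur _; simp [spD]
  | cons c rest ih =>
    intro b cur h
    have hc : c ≠ '-' := fun hh => h (by simp [hh])
    have hr : '-' ∉ rest := fun hh => h (by simp [hh])
    simp [spD, hc, ih b (c :: cur) hr]

theorem alnum_ne_dash {x : Char} (h : PySem.Chars.isalnum x = true) : x ≠ '-' := by
  intro hx; subst hx; revert h; decide

theorem digit_ne_dash {x : Char} (h : PySem.Chars.isdigit x = true) : x ≠ '-' := by
  intro hx; subst hx; revert h; decide

-- mask-matching structural lemmas
theorem vkfMatches_cons (c p : Char) (cs pat : List Char) :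
    vkfMatches (c :: cs) (p :: pat) = (vkfCheckChar c p && vkfMatches cs pat) := by
  simp [vkfMatches]

theorem vkfMatches_append (p1 p2 cs1 cs2 : List Char) (h : cs1.length = p1.length) :
    vkfMatches (cs1 ++ cs2) (p1 ++ p2) = (vkfMatches cs1 p1 && vkfMatches cs2 p2) := by
  simp [vkfMatches, List.zip_append h]

theorem vkfMatches_star (cs : List Char) (n : Nat) (h : cs.length = n) :
    vkfMatches cs (List.replicate n '*') = cs.all PySem.Chars.isalnum := by
  induction cs generalizing n with
  | nil => subst h; simp [vkfMatches]
  | cons c rest ih =>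
    subst h
    simp only [List.length_cons, List.replicate_succ, vkfMatches_cons, List.all_cons]
    rw [ih rest.length rfl]
    simp [vkfCheckChar]

theorem vkfMatches_hash (cs : List Char) (n : Nat) (h : cs.length = n) :
    vkfMatches cs (List.replicate n '#') = cs.all PySem.Chars.isdigit := by
  induction cs generalizing n with
  | nil => subst h; simp [vkfMatches]
  | cons c rest ih =>
    subst h
    simp only [List.length_cons, List.replicate_succ, vkfMatches_cons, List.all_cons]
    rw [ih rest.length rfl]
    simp [vkfCheckChar]

-- the common shape of both formats' tails: n-char parts separated by dashes
def PParts (n : Nat) (pred : Char → Bool) : List (List Char) → Prop :=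
  fun ps => ∀ p ∈ ps, p.length = n ∧ p.all pred = true

-- Enhanced format characterization
def P29 (cs : List Char) : Prop :=
  ∃ a b c d e : List Char,
    cs = a ++ '-' :: (b ++ '-' :: (c ++ '-' :: (d ++ '-' :: e))) ∧
    PParts 5 PySem.Chars.isalnum [a, b, c, d, e]

-- SMIS format characterization
def P24 (cs : List Char) : Prop :=
  ∃ b c d e : List Char,
    cs = ['S', 'M', 'I', 'S'] ++ '-' :: (b ++ '-' :: (c ++ '-' :: (d ++ '-' :: e))) ∧
    b.length = 4 ∧ b.all PySem.Chars.isalnum = true ∧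
    c.length = 4 ∧ c.all PySem.Chars.isdigit = true ∧
    d.length = 4 ∧ d.all PySem.Chars.isalnum = true ∧
    e.length = 4 ∧ e.all PySem.Chars.isalnum = true

theorem checkChar_star (c : Char) : vkfCheckChar c '*' = PySem.Chars.isalnum c := rfl

theorem checkChar_hash (c : Char) : vkfCheckChar c '#' = PySem.Chars.isdigit c := rfl

theorem checkChar_dash (c : Char) : vkfCheckChar c '-' = (c == '-') := rfl

theorem matches_lit_cons (c0 : Char) (cs pat : List Char) (h0 : c0 ≠ '*') (h1 : c0 ≠ '#')
    (hlen : 0 < cs.length) (h : vkfMatches cs (c0 :: pat) = true) :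
    ∃ rest, cs = c0 :: rest ∧ vkfMatches rest pat = true := by
  cases cs with
  | nil => simp at hlen
  | cons c rest =>
    rw [vkfMatches_cons, Bool.and_eq_true] at h
    have hc : c = c0 := by
      have := h.1
      simp only [vkfCheckChar, beq_iff_eq] at this
      simp only [if_neg h0, if_neg h1] at this
      simpa using this
    exact ⟨rest, by rw [hc], h.2⟩

theorem matches_decomp_mask (m : Char) (pred : Char → Bool)
    (hm : ∀ c, vkfCheckChar c m = pred c) :
    ∀ (n : Nat) (cs pat : List Char), n < cs.length →
    vkfMatches cs (List.replicate n m ++ '-' :: pat) = true →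
    ∃ a rest, cs = a ++ '-' :: rest ∧ a.length = n ∧ a.all pred = true ∧
      vkfMatches rest pat = true := by
  intro n
  induction n with
  | zero =>
    intro cs pat hlen h
    simp only [List.replicate_zero, List.nil_append] at h
    obtain ⟨rest, hcs, hrest⟩ := matches_lit_cons '-' cs pat (by decide) (by decide) hlen h
    exact ⟨[], rest, by simpa using hcs, rfl, rfl, hrest⟩
  | succ k ih =>
    intro cs pat hlen h
    cases cs with
    | nil => simp at hlen
    | cons c rest =>
      rw [List.replicate_succ, List.cons_append, vkfMatches_cons, Bool.and_eq_true] at h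
      obtain ⟨a, r, hr, hal, hall, hmr⟩ := ih rest pat (by simpa using Nat.lt_of_succ_lt_succ hlen) h.2
      refine ⟨c :: a, r, by rw [hr]; rfl, by simp [hal], ?_, hmr⟩
      rw [List.all_cons, hall, ← hm c, h.1]; rfl

theorem no_dash_of_all_alnum {l : List Char} (h : l.all PySem.Chars.isalnum = true) : '-' ∉ l := by
  intro hm
  exact alnum_ne_dash (by rw [List.all_eq_true] at h; exact h _ hm) rfl

theorem no_dash_of_all_digit {l : List Char} (h : l.all PySem.Chars.isdigit = true) : '-' ∉ l := by
  intro hm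
  exact digit_ne_dash (by rw [List.all_eq_true] at h; exact h _ hm) rfl

theorem pat29_eq : ("*****-*****-*****-*****-*****" : String).toList =
    List.replicate 5 '*' ++ '-' :: (List.replicate 5 '*' ++ '-' :: (List.replicate 5 '*' ++ '-' ::
      (List.replicate 5 '*' ++ '-' :: List.replicate 5 '*'))) := by decide

theorem pat24_eq : ("SMIS-****-####-****-****" : String).toList =
    'S' :: 'M' :: 'I' :: 'S' :: '-' :: (List.replicate 4 '*' ++ '-' :: (List.replicate 4 '#' ++ '-' ::
      (List.replicate 4 '*' ++ '-' :: List.replicate 4 '*'))) := by decide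

theorem list_len5 {α : Type} (l : List α) (h : l.length = 5) : ∃ a b c d e, l = [a, b, c, d, e] := by
  match l, h with
  | [a, b, c, d, e], _ => exact ⟨a, b, c, d, e, rfl⟩

theorem spD_of_decomp (a b c d e : List Char) (ha : '-' ∉ a) (hb : '-' ∉ b) (hc : '-' ∉ c)
    (hd : '-' ∉ d) (he : '-' ∉ e) :
    spD (a ++ '-' :: (b ++ '-' :: (c ++ '-' :: (d ++ '-' :: e)))) [] = [a, b, c, d, e] := by
  rw [spD_append a _ [] ha, spD_append b _ [] hb, spD_append c _ [] hc, spD_append d _ [] hd,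
    spD_no_dash e [] he]
  simp

theorem partAlnum_iff (l : List Char) (n : Nat) (hn : 0 < n) :
    (PySem.Str.len (String.ofList l) = (n : Int) ∧ PySem.Str.strIsalnum (String.ofList l) = true) ↔
    (l.length = n ∧ l.all PySem.Chars.isalnum = true) := by
  simp only [PySem.Str.len, PySem.Str.strIsalnum, String.toList_ofList, PySem.Chars.strIsalnum,
    Bool.and_eq_true, Bool.not_eq_true', List.isEmpty_eq_false_iff, Nat.cast_inj]
  constructor
  · rintro ⟨h1, _, h2⟩; exact ⟨by exact_mod_cast h1, h2⟩
  · rintro ⟨h1, h2⟩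
    refine ⟨by exact_mod_cast h1, ?_, h2⟩
    intro hnil; rw [hnil] at h1; simp at h1; omega

theorem B29_iff (cs : List Char) (h : cs.length = 29) :
    vkfMatches cs ("*****-*****-*****-*****-*****" : String).toList = true ↔ P29 cs := by
  rw [pat29_eq]
  constructor
  · intro hb
    obtain ⟨a, r1, e1, la, aa, hb⟩ := matches_decomp_mask '*' _ checkChar_star 5 cs _ (by omega) hb
    have hl1 : r1.length = 23 := by rw [e1] at h; simp [la] at h; omega
    obtain ⟨b, r2, e2, lb, ab, hb⟩ := matches_decomp_mask '*' _ checkChar_star 5 r1 _ (by omega) hb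
    have hl2 : r2.length = 17 := by rw [e2] at hl1; simp [lb] at hl1; omega
    obtain ⟨c, r3, e3, lc, ac, hb⟩ := matches_decomp_mask '*' _ checkChar_star 5 r2 _ (by omega) hb
    have hl3 : r3.length = 11 := by rw [e3] at hl2; simp [lc] at hl2; omega
    obtain ⟨d, r4, e4, ld, ad, hb⟩ := matches_decomp_mask '*' _ checkChar_star 5 r3 _ (by omega) hb
    have hl4 : r4.length = 5 := by rw [e4] at hl3; simp [ld] at hl3; omega
    have ae : r4.all PySem.Chars.isalnum = true := by rw [← vkfMatches_star r4 5 hl4]; exact hb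
    refine ⟨a, b, c, d, r4, by rw [e1, e2, e3, e4], ?_⟩
    intro p hp
    simp only [List.mem_cons, List.not_mem_nil, or_false] at hp
    rcases hp with rfl | rfl | rfl | rfl | rfl
    exacts [⟨la, aa⟩, ⟨lb, ab⟩, ⟨lc, ac⟩, ⟨ld, ad⟩, ⟨hl4, ae⟩]
  · rintro ⟨a, b, c, d, e, rfl, hp⟩
    have ha := hp a (by simp); have hbp := hp b (by simp); have hc := hp c (by simp)
    have hd := hp d (by simp); have he := hp e (by simp)
    rw [vkfMatches_append _ _ a _ (by simp [ha.1]), vkfMatches_cons,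
      vkfMatches_append _ _ b _ (by simp [hbp.1]), vkfMatches_cons,
      vkfMatches_append _ _ c _ (by simp [hc.1]), vkfMatches_cons,
      vkfMatches_append _ _ d _ (by simp [hd.1]), vkfMatches_cons,
      vkfMatches_star a 5 ha.1, vkfMatches_star b 5 hbp.1, vkfMatches_star c 5 hc.1,
      vkfMatches_star d 5 hd.1, vkfMatches_star e 5 he.1]
    simp [checkChar_dash, ha.2, hbp.2, hc.2, hd.2, he.2]

theorem B24_iff (cs : List Char) (h : cs.length = 24) :
    vkfMatches cs ("SMIS-****-####-****-****" : String).toList = true ↔ P24 cs := by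
  rw [pat24_eq]
  constructor
  · intro hb
    obtain ⟨r1, e1, hb⟩ := matches_lit_cons 'S' cs _ (by decide) (by decide) (by omega) hb
    have hl1 : r1.length = 23 := by rw [e1] at h; simpa using h
    obtain ⟨r2, e2, hb⟩ := matches_lit_cons 'M' r1 _ (by decide) (by decide) (by omega) hb
    have hl2 : r2.length = 22 := by rw [e2] at hl1; simpa using hl1
    obtain ⟨r3, e3, hb⟩ := matches_lit_cons 'I' r2 _ (by decide) (by decide) (by omega) hb
    have hl3 : r3.length = 21 := by rw [e3] at hl2; simpa using hl2
    obtain ⟨r4, e4, hb⟩ := matches_lit_cons 'S' r3 _ (by decide) (by decide) (by omega) hb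
    have hl4 : r4.length = 20 := by rw [e4] at hl3; simpa using hl3
    obtain ⟨r5, e5, hb⟩ := matches_lit_cons '-' r4 _ (by decide) (by decide) (by omega) hb
    have hl5 : r5.length = 19 := by rw [e5] at hl4; simpa using hl4
    obtain ⟨b, r6, e6, lb, ab, hb⟩ := matches_decomp_mask '*' _ checkChar_star 4 r5 _ (by omega) hb
    have hl6 : r6.length = 14 := by rw [e6] at hl5; simp [lb] at hl5; omega
    obtain ⟨c, r7, e7, lc, ac, hb⟩ := matches_decomp_mask '#' _ checkChar_hash 4 r6 _ (by omega) hb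
    have hl7 : r7.length = 9 := by rw [e7] at hl6; simp [lc] at hl6; omega
    obtain ⟨d, r8, e8, ld, ad, hb⟩ := matches_decomp_mask '*' _ checkChar_star 4 r7 _ (by omega) hb
    have hl8 : r8.length = 4 := by rw [e8] at hl7; simp [ld] at hl7; omega
    have ae : r8.all PySem.Chars.isalnum = true := by rw [← vkfMatches_star r8 4 hl8]; exact hb
    exact ⟨b, c, d, r8, by rw [e1, e2, e3, e4, e5, e6, e7, e8]; rfl,
      lb, ab, lc, ac, ld, ad, hl8, ae⟩
  · rintro ⟨b, c, d, e, rfl, lb, ab, lc, ac, ld, ad, le, ae⟩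
    rw [show (['S','M','I','S'] ++ '-' :: (b ++ '-' :: (c ++ '-' :: (d ++ '-' :: e))) : List Char) =
      'S' :: 'M' :: 'I' :: 'S' :: '-' :: (b ++ '-' :: (c ++ '-' :: (d ++ '-' :: e))) from rfl]
    rw [vkfMatches_cons, vkfMatches_cons, vkfMatches_cons, vkfMatches_cons, vkfMatches_cons,
      vkfMatches_append _ _ b _ (by simp [lb]), vkfMatches_cons,
      vkfMatches_append _ _ c _ (by simp [lc]), vkfMatches_cons,
      vkfMatches_append _ _ d _ (by simp [ld]), vkfMatches_cons,
      vkfMatches_star b 4 lb, vkfMatches_hash c 4 lc, vkfMatches_star d 4 ld,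
      vkfMatches_star e 4 le]
    simp [vkfCheckChar, ab, ac, ad, ae]

theorem A29_iff (cs : List Char) :
    ((spD cs []).length = 5 ∧ ∀ p ∈ spD cs [], p.length = 5 ∧ p.all PySem.Chars.isalnum = true) ↔
    P29 cs := by
  constructor
  · rintro ⟨h5, hall⟩
    obtain ⟨a, b, c, d, e, hps⟩ := list_len5 _ h5
    have hcs : cs = a ++ '-' :: (b ++ '-' :: (c ++ '-' :: (d ++ '-' :: e))) := by
      have hj := spD_join cs []
      rw [hps] at hj
      simpa [joinD] using hj.symm
    refine ⟨a, b, c, d, e, hcs, ?_⟩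
    rw [← hps]; exact hall
  · rintro ⟨a, b, c, d, e, rfl, hp⟩
    have hsp := spD_of_decomp a b c d e
      (no_dash_of_all_alnum (hp a (by simp)).2) (no_dash_of_all_alnum (hp b (by simp)).2)
      (no_dash_of_all_alnum (hp c (by simp)).2) (no_dash_of_all_alnum (hp d (by simp)).2)
      (no_dash_of_all_alnum (hp e (by simp)).2)
    rw [hsp]
    exact ⟨rfl, hp⟩

theorem P24_decomp_spD (b c d e : List Char) (hb : '-' ∉ b) (hc : '-' ∉ c) (hd : '-' ∉ d)
    (he : '-' ∉ e) :
    spD (['S','M','I','S'] ++ '-' :: (b ++ '-' :: (c ++ '-' :: (d ++ '-' :: e)))) [] =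
      [['S','M','I','S'], b, c, d, e] :=
  spD_of_decomp _ b c d e (by decide) hb hc hd he

theorem strAlnum_all {l : List Char} (h : PySem.Chars.strIsalnum l = true) :
    l.all PySem.Chars.isalnum = true := by
  simp [PySem.Chars.strIsalnum] at h; exact List.all_eq_true.mpr h.2

theorem strDigit_all {l : List Char} (h : PySem.Chars.strIsdigit l = true) :
    l.all PySem.Chars.isdigit = true := by
  simp [PySem.Chars.strIsdigit] at h; exact List.all_eq_true.mpr h.2

theorem strAlnum_true {l : List Char} (hne : l ≠ []) (ha : l.all PySem.Chars.isalnum = true) :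
    PySem.Chars.strIsalnum l = true := by
  cases l with
  | nil => exact absurd rfl hne
  | cons x xs => simpa [PySem.Chars.strIsalnum] using ha

theorem strDigit_true {l : List Char} (hne : l ≠ []) (ha : l.all PySem.Chars.isdigit = true) :
    PySem.Chars.strIsdigit l = true := by
  cases l with
  | nil => exact absurd rfl hne
  | cons x xs => simpa [PySem.Chars.strIsdigit] using ha

theorem hsplit_spD (key : String) :
    (PySem.Str.split? key "-").getD [] = (spD key.toList []).map String.ofList := by
  simp [PySem.Str.split?, PySem.Chars.split?, splitOn_eq_spD,
    show ("-" : String).toList = ['-'] from rfl]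

set_option maxHeartbeats 1000000 in
theorem validate_key_format_spec : Claim_equal_validate_key_format := by
  intro key _
  unfold Spec_validate_key_format
  by_cases hk : key = ""
  · subst hk; decide
  · have hkb : (key == "") = false := by simpa using hk
    by_cases h29 : key.toList.length = 29
    · have hL : PySem.Str.len key = 29 := by rw [PySem.Str.len_eq, h29]; rfl
      have hL24 : ¬ PySem.Str.len key = 24 := by rw [hL]; decide
      have hni : ¬ ((29 : Int) = 24) := by decide
      by_cases hp5 : (spD key.toList []).length = 5
      · simp only [validate_key_format, validate_key_format_alt, vkfEnhanced, vkfSmis, hkb,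
          Bool.false_eq_true, if_false, hL, if_true, reduceIte, hsplit_spD, List.length_map,
          hp5, hni]
        rw [Bool.eq_iff_iff]
        constructor
        · intro hA
          refine (B29_iff _ h29).mpr ((A29_iff _).mp ⟨hp5, ?_⟩)
          intro p hp
          rw [List.all_map, List.all_eq_true] at hA
          have hx := hA p hp
          simp only [Function.comp_apply, Bool.and_eq_true, beq_iff_eq] at hx
          exact (partAlnum_iff p 5 (by omega)).mp ⟨hx.1, hx.2⟩
        · intro hB
          have hP := (A29_iff _).mpr ((B29_iff _ h29).mp hB)
          rw [List.all_map, List.all_eq_true]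
          intro p hp
          have hx := (partAlnum_iff p 5 (by omega)).mpr (hP.2 p hp)
          simp only [Function.comp_apply, Bool.and_eq_true, beq_iff_eq]
          exact ⟨hx.1, hx.2⟩
      · simp only [validate_key_format, validate_key_format_alt, vkfEnhanced, vkfSmis, hkb,
          Bool.false_eq_true, if_false, hL, hL24, if_true, reduceIte, hsplit_spD,
          List.length_map, hp5, hni]
        cases hBv : vkfMatches key.toList ("*****-*****-*****-*****-*****" : String).toList with
        | false => rfl
        | true => exact absurd ((A29_iff _).mpr ((B29_iff _ h29).mp hBv)).1 hp5
    · by_cases h24 : key.toList.length = 24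
      · have hL : PySem.Str.len key = 24 := by rw [PySem.Str.len_eq, h24]; rfl
        have hKL : (key.length : Int) = 24 := by simpa using hL
        have hKL29 : ¬ (key.length : Int) = 29 := by simp [hKL]
        by_cases hp5 : (spD key.toList []).length = 5
        · obtain ⟨a, b, c, d, e, hps⟩ := list_len5 _ hp5
          have hparts : (PySem.Str.split? key "-").getD [] =
              [String.ofList a, String.ofList b, String.ofList c, String.ofList d,
                String.ofList e] := by
            rw [hsplit_spD, hps]; rfl
          have hjoin : key.toList =
              a ++ '-' :: (b ++ '-' :: (c ++ '-' :: (d ++ '-' :: e))) := by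
            have hj := spD_join key.toList []
            rw [hps] at hj
            simpa [joinD] using hj.symm
          have hBiff : vkfMatches key.toList
              ['S', 'M', 'I', 'S', '-', '*', '*', '*', '*', '-', '#', '#', '#', '#', '-',
                '*', '*', '*', '*', '-', '*', '*', '*', '*'] = true ↔
              (a = ['S', 'M', 'I', 'S'] ∧ b.length = 4 ∧ b.all PySem.Chars.isalnum = true ∧
                c.length = 4 ∧ c.all PySem.Chars.isdigit = true ∧
                d.length = 4 ∧ d.all PySem.Chars.isalnum = true ∧
                e.length = 4 ∧ e.all PySem.Chars.isalnum = true) := by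
            rw [show (['S', 'M', 'I', 'S', '-', '*', '*', '*', '*', '-', '#', '#', '#', '#', '-',
              '*', '*', '*', '*', '-', '*', '*', '*', '*'] : List Char) =
              ("SMIS-****-####-****-****" : String).toList from rfl]
            rw [B24_iff _ h24]
            constructor
            · rintro ⟨b', c', d', e', hcs, lb, ab, lc, ac, ld, ad, le, ae⟩
              have hsp := P24_decomp_spD b' c' d' e' (no_dash_of_all_alnum ab)
                (no_dash_of_all_digit ac) (no_dash_of_all_alnum ad) (no_dash_of_all_alnum ae)
              rw [← hcs, hps] at hsp
              simp only [List.cons.injEq, and_true] at hsp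
              obtain ⟨ha, hb, hc, hd, he⟩ := hsp
              subst ha; subst hb; subst hc; subst hd; subst he
              exact ⟨rfl, lb, ab, lc, ac, ld, ad, le, ae⟩
            · rintro ⟨ha, lb, ab, lc, ac, ld, ad, le, ae⟩
              subst ha
              exact ⟨b, c, d, e, hjoin, lb, ab, lc, ac, ld, ad, le, ae⟩
          simp [validate_key_format, validate_key_format_alt, vkfEnhanced, vkfSmis, hkb,
            hKL, hKL29, hparts, PySem.List.pyGet?, PySem.List.pyIdx?]
          rw [Bool.eq_iff_iff]
          constructor
          · intro hA
            split_ifs at hA with h1 h2 h3 h4 h5 <;> simp at hA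
            have ha : a = ['S', 'M', 'I', 'S'] := by
              have := congrArg String.toList h1
              simpa using this
            rw [not_or, not_not] at h2 h3 h4 h5
            refine hBiff.mpr ⟨ha, by exact_mod_cast h2.1,
              strAlnum_all (Bool.not_eq_false _ ▸ h2.2), by exact_mod_cast h3.1,
              strDigit_all (Bool.not_eq_false _ ▸ h3.2), by exact_mod_cast h4.1,
              strAlnum_all (Bool.not_eq_false _ ▸ h4.2), by exact_mod_cast h5.1,
              strAlnum_all (Bool.not_eq_false _ ▸ h5.2)⟩
          · intro hB
            obtain ⟨ha, lb, ab, lc, ac, ld, ad, le, ae⟩ := hBiff.mp hB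
            subst ha
            have hbne : b ≠ [] := by intro h; rw [h] at lb; simp at lb
            have hcne : c ≠ [] := by intro h; rw [h] at lc; simp at lc
            have hdne : d ≠ [] := by intro h; rw [h] at ld; simp at ld
            have hene : e ≠ [] := by intro h; rw [h] at le; simp at le
            have d1 : ¬ (¬ (b.length : Int) = 4 ∨ PySem.Chars.strIsalnum b = false) := by
              rw [not_or, not_not]
              exact ⟨by exact_mod_cast lb, by simp [strAlnum_true hbne ab]⟩
            have d2 : ¬ (¬ (c.length : Int) = 4 ∨ PySem.Chars.strIsdigit c = false) := by
              rw [not_or, not_not]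
              exact ⟨by exact_mod_cast lc, by simp [strDigit_true hcne ac]⟩
            have d3 : ¬ (¬ (d.length : Int) = 4 ∨ PySem.Chars.strIsalnum d = false) := by
              rw [not_or, not_not]
              exact ⟨by exact_mod_cast ld, by simp [strAlnum_true hdne ad]⟩
            have d4 : ¬ (¬ (e.length : Int) = 4 ∨ PySem.Chars.strIsalnum e = false) := by
              rw [not_or, not_not]
              exact ⟨by exact_mod_cast le, by simp [strAlnum_true hene ae]⟩
            simp [d1, d2, d3, d4, show String.ofList ['S', 'M', 'I', 'S'] = "SMIS" from rfl]
        · simp [validate_key_format, validate_key_format_alt, vkfEnhanced, vkfSmis, hkb,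
            hKL, hKL29, hsplit_spD, hp5]
          have hBf : vkfMatches key.toList
              ['S', 'M', 'I', 'S', '-', '*', '*', '*', '*', '-', '#', '#', '#', '#', '-',
                '*', '*', '*', '*', '-', '*', '*', '*', '*'] = false := by
            cases hBv : vkfMatches key.toList
                ['S', 'M', 'I', 'S', '-', '*', '*', '*', '*', '-', '#', '#', '#', '#', '-',
                  '*', '*', '*', '*', '-', '*', '*', '*', '*'] with
            | false => rfl
            | true =>
              exfalso
              rw [show (['S', 'M', 'I', 'S', '-', '*', '*', '*', '*', '-', '#', '#', '#', '#',
                '-', '*', '*', '*', '*', '-', '*', '*', '*', '*'] : List Char) =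
                ("SMIS-****-####-****-****" : String).toList from rfl] at hBv
              obtain ⟨b', c', d', e', hcs, lb, ab, lc, ac, ld, ad, le, ae⟩ :=
                (B24_iff _ h24).mp hBv
              have hsp := P24_decomp_spD b' c' d' e' (no_dash_of_all_alnum ab)
                (no_dash_of_all_digit ac) (no_dash_of_all_alnum ad) (no_dash_of_all_alnum ae)
              rw [← hcs] at hsp
              exact hp5 (by rw [hsp]; rfl)
          rw [hBf]
      · have hKL29 : ¬ (key.length : Int) = 29 := by
          intro hh; exact h29 (by rw [String.length_toList]; exact_mod_cast hh)
        have hKL24 : ¬ (key.length : Int) = 24 := by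
          intro hh; exact h24 (by rw [String.length_toList]; exact_mod_cast hh)
        simp [validate_key_format, validate_key_format_alt, vkfEnhanced, vkfSmis, hkb,
          hKL29, hKL24]
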